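-- pv_equiv track=rewrite | github.com/preferchoi/algorithm | programmers/LV.1/크레인 인형뽑기 게임.py | solution
-- ===== SOURCE A (Python) =====
-- def solution(board, moves):
--
--     answer = 0
--
--     box = [[] for _ in range(len(board[0]))]
--
--     for i in board:
--         idx = 0
--         for j in i:
--             if j:
--                 box[idx].append(j)
--             idx += 1
--
--     pop_list = []
--
--     for i in moves:
--         if box[i-1]:
--             tmp = box[i-1].pop(0)
--             if not pop_list:
--                 pop_list.append(tmp)
--             elif pop_list[-1] == tmp:
--                 answer += 2
--                 pop_list.pop()
--             else:
--                 pop_list.append(tmp)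
--
--     return answer
-- ===== SOURCE B (Python) =====
-- def solution(board, moves):
--     # Lazy column scan: keep one pointer per column into the original board
--     # instead of pre-extracting every column into lists.
--     answer = 0
--     ptr = [0] * len(board[0])
--     stack = []
--     for m in moves:
--         c = m - 1
--         r = ptr[c]
--         doll = 0
--         while r < len(board):
--             row = board[r]
--             r += 1
--             if c < len(row) and row[c]:
--                 doll = row[c]
--                 break
--         ptr[c] = r
--         if doll:
--             if stack and stack[-1] == doll:
--                 answer += 2
--                 stack.pop()
--             else:
--                 stack.append(doll)
--     return answer
-- ===== Notes on version B (the rewrite author's own statement) =====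
-- stated objective: alternative
-- what changed: B drops A's pre-extraction of every column into per-column lists and instead keeps one integer pointer per column into the untouched board, scanning each column lazily downward only when a move asks for it.
-- outside the precondition, e.g. on solution([[2, 9], [9]], [0, 0]): A returns 0, B returns 2
import Mathlib
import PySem

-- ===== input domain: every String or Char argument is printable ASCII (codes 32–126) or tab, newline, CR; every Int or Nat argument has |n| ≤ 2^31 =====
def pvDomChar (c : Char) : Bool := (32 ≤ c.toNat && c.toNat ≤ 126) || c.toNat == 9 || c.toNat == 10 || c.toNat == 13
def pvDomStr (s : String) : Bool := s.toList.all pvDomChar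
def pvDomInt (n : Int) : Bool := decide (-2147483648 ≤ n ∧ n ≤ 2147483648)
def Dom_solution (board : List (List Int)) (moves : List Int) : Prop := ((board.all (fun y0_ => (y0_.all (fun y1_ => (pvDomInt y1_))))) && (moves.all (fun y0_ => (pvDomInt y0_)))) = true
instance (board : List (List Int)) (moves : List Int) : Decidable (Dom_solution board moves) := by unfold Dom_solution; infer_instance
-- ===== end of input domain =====

-- B replaces A's eager extraction of every column into per-column lists by one integer
-- pointer per column into the untouched board, scanning each column lazily on demand
-- (objective: alternative decomposition; neither program mutates its arguments).

-- ===== PORT A =====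

-- inner row loop: 'idx = 0; for j in i: if j: box[idx].append(j); idx += 1'
-- (box[idx].append would raise IndexError for idx ≥ len(box); Pre_ keeps idx in range,
--  so the out-of-range no-op of List.modify is never reached on admitted inputs)
def fillRow (box : List (List Int)) (row : List Int) : List (List Int) :=
  (row.foldl
    (fun (s : List (List Int) × Nat) j =>
      ((if j ≠ 0 then s.1.modify s.2 (· ++ [j]) else s.1), s.2 + 1))
    (box, 0)).1

-- one iteration of 'for i in moves' on state (answer, box, pop_list)
def aStep (st : Int × List (List Int) × List Int) (i : Int) : Int × List (List Int) × List Int :=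
  let ans := st.1; let box := st.2.1; let pop := st.2.2
  match PySem.List.pyGet? box (i - 1) with
  | none => (ans, box, pop)                 -- box[i-1] IndexError; excluded by Pre_
  | some [] => (ans, box, pop)              -- 'if box[i-1]:' falsy: nothing happens
  | some (tmp :: rest) =>                   -- tmp = box[i-1].pop(0)
    let box' := PySem.List.pySetD box (i - 1) rest
    match pop.getLast? with
    | none => (ans, box', pop ++ [tmp])                             -- 'if not pop_list'
    | some t =>
      if t = tmp then (ans + 2, box', pop.dropLast)                 -- 'elif pop_list[-1] == tmp'
      else (ans, box', pop ++ [tmp])                                -- 'else'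

def solution (board : List (List Int)) (moves : List Int) : Int :=
  match PySem.List.pyGet? board 0 with
  | none => 0                               -- board[0] raises IndexError; excluded by Pre_
  | some row0 =>
    let box0 : List (List Int) := List.replicate row0.length []   -- [[] for _ in range(len(board[0]))]
    let box := board.foldl fillRow box0
    (moves.foldl aStep (0, box, [])).1

-- ===== PORT B =====

-- B's 'while r < len(board)' scan from row index r, ported on the suffix board[r:];
-- returns (doll found or none, how many rows were consumed).
-- '(pyGet? row c).getD 0' is Python's row[c], only read under 'c < len(row)'; inside
-- Pre_ we also have -len(row) ≤ c, where pyGet? is exact.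
def scanCol (c : Int) : List (List Int) → Option Int × Nat
  | [] => (none, 0)
  | row :: rest =>
    if c < (row.length : Int) ∧ (PySem.List.pyGet? row c).getD 0 ≠ 0 then
      (some ((PySem.List.pyGet? row c).getD 0), 1)
    else
      let s := scanCol c rest
      (s.1, s.2 + 1)

-- one iteration of 'for m in moves' on state (answer, ptr, stack)
def bStep (board : List (List Int)) (st : Int × List Int × List Int) (m : Int) : Int × List Int × List Int :=
  let ans := st.1; let ptr := st.2.1; let stack := st.2.2
  match PySem.List.pyGet? ptr (m - 1) with
  | none => (ans, ptr, stack)               -- ptr[m-1] IndexError; excluded by Pre_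
  | some r =>
    let s := scanCol (m - 1) (board.drop r.toNat)
    let ptr' := PySem.List.pySetD ptr (m - 1) (r + (s.2 : Int))     -- ptr[c] = r (advanced)
    match s.1 with
    | none => (ans, ptr', stack)                                    -- doll == 0
    | some doll =>
      if stack.getLast? = some doll then (ans + 2, ptr', stack.dropLast)   -- 'stack and stack[-1] == doll'
      else (ans, ptr', stack ++ [doll])

def solution_alt (board : List (List Int)) (moves : List Int) : Int :=
  match PySem.List.pyGet? board 0 with
  | none => 0                               -- len(board[0]) raises IndexError; excluded by Pre_
  | some row0 =>
    (moves.foldl (bStep board) (0, List.replicate row0.length (0 : Int), [])).1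

-- ===== PRECONDITION & SPEC =====
-- Pre_ excludes (a) inputs where A raises IndexError: an empty board, a row longer than
-- the first row, or a move outside [1-width, width]; and (b) ragged boards (some row
-- shorter than the first) when a non-positive (wrapping) move is present: there A's
-- per-column extraction and B's per-row negative indexing pick different cells and both
-- readings of a malformed board are defensible.
def Pre_solution (board : List (List Int)) (moves : List Int) : Prop :=
  board ≠ [] ∧
  (∀ row ∈ board, row.length ≤ (board.headD []).length) ∧
  (∀ i ∈ moves, 1 - ((board.headD []).length : Int) ≤ i ∧ i ≤ ((board.headD []).length : Int)) ∧
  ((∃ i ∈ moves, i ≤ 0) → ∀ row ∈ board, row.length = (board.headD []).length)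
instance (board : List (List Int)) (moves : List Int) : Decidable (Pre_solution board moves) := by
  unfold Pre_solution; infer_instance

def pvWitness_solution : List (List Int) × List Int :=
  ([[0, 0, 0, 0, 0], [0, 0, 1, 0, 3], [0, 2, 5, 0, 1], [4, 2, 4, 4, 2], [3, 5, 1, 3, 1]],
   [1, 5, 3, 5, 1, 2, 1, 4])

def Spec_solution (board : List (List Int)) (moves : List Int) (out : Int) : Prop := out = solution_alt board moves
instance (board : List (List Int)) (moves : List Int) (out : Int) : Decidable (Spec_solution board moves out) := by unfold Spec_solution; infer_instance

-- ===== CLAIM (what is proved, stated in full; the proofs are below) =====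
def Claim_equal_solution : Prop := ∀ (board : List (List Int)) (moves : List Int), Dom_solution board moves → Pre_solution board moves → Spec_solution board moves (solution board moves)

-- ===== LEMMAS AND PROOFS =====

-- the (at most one) doll an individual row contributes to column n
def optCell : Option Int → List Int
  | some v => if v = 0 then [] else [v]
  | none => []

-- the non-zero cells of column n of `rows`, top to bottom
def colCells (n : Nat) (rows : List (List Int)) : List Int :=
  rows.flatMap (fun row => optCell row[n]?)

theorem colCells_cons (n : Nat) (row : List Int) (rest : List (List Int)) :
    colCells n (row :: rest) = optCell row[n]? ++ colCells n rest := by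
  simp [colCells]

theorem fill_aux (row : List Int) : ∀ (box : List (List Int)) (k n : Nat),
    ((row.foldl
      (fun (s : List (List Int) × Nat) j =>
        ((if j ≠ 0 then s.1.modify s.2 (· ++ [j]) else s.1), s.2 + 1)) (box, k)).1)[n]? =
    if n < k then box[n]? else (box[n]?).map (· ++ optCell row[n - k]?) := by
  induction row with
  | nil =>
    intro box k n
    cases h : box[n]? <;> simp [optCell, h]
  | cons j row ih =>
    intro box k n
    simp only [List.foldl_cons]
    rw [ih]
    rcases Nat.lt_trichotomy n k with hnk | hnk | hnk
    · have h1 : n < k := hnk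
      have h2 : n < k + 1 := by omega
      simp only [if_pos h1, if_pos h2]
      split
      · simp only [List.getElem?_modify]
        cases box[n]?
        · simp
        · simp
          omega
      · rfl
    · subst hnk
      simp only [Nat.lt_irrefl, if_pos (by omega : n < n + 1), Nat.sub_self]
      by_cases hj : j = 0
      · subst hj
        simp only [ne_eq, not_true_eq_false, ite_false]
        cases h : box[n]? <;> simp [optCell]
      · simp only [ne_eq, hj, not_false_eq_true, if_pos]
        cases h : box[n]? <;> simp [optCell, h, hj]
    · have h1 : ¬ n < k := by omega
      have h2 : ¬ n < k + 1 := by omega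
      simp only [if_neg h1, if_neg h2]
      have hd : (j :: row)[n - k]? = row[n - (k + 1)]? := by
        have : n - k = (n - (k + 1)) + 1 := by omega
        rw [this]
        simp
      rw [hd]
      split
      · simp only [List.getElem?_modify]
        cases box[n]?
        · simp
        · simp
          omega
      · rfl

theorem fillRow_getElem? (box : List (List Int)) (row : List Int) (n : Nat) :
    (fillRow box row)[n]? = (box[n]?).map (· ++ optCell row[n]?) := by
  have := fill_aux row box 0 n
  simpa [fillRow] using this

theorem fill_len_aux (row : List Int) : ∀ (box : List (List Int)) (k : Nat),
    ((row.foldl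
      (fun (s : List (List Int) × Nat) j =>
        ((if j ≠ 0 then s.1.modify s.2 (· ++ [j]) else s.1), s.2 + 1)) (box, k)).1).length
    = box.length := by
  induction row with
  | nil => intro box k; rfl
  | cons j row ih =>
    intro box k
    simp only [List.foldl_cons]
    rw [ih]
    split <;> simp

theorem foldl_fill (rows : List (List Int)) : ∀ (box : List (List Int)) (n : Nat),
    (rows.foldl fillRow box)[n]? = (box[n]?).map (· ++ colCells n rows) := by
  induction rows with
  | nil =>
    intro box n
    cases h : box[n]? <;> simp [colCells, h]
  | cons row rest ih =>
    intro box n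
    simp only [List.foldl_cons]
    rw [ih, fillRow_getElem?, colCells_cons]
    cases box[n]? <;> simp

theorem foldl_fill_len (rows : List (List Int)) : ∀ (box : List (List Int)),
    (rows.foldl fillRow box).length = box.length := by
  induction rows with
  | nil => intro box; rfl
  | cons row rest ih =>
    intro box
    simp only [List.foldl_cons]
    rw [ih, fillRow, fill_len_aux]

-- Python index c on a list denotes position n (same n for reads and writes)
def ResolvesTo (c : Int) (n : Nat) (row : List Int) : Prop :=
  (c < (row.length : Int) ↔ n < row.length) ∧ PySem.List.pyGet? row c = row[n]?

theorem pyIdx?_resolve (len : Nat) (c : Int) (h1 : -(len : Int) ≤ c) (h2 : c < len) :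
    PySem.List.pyIdx? len c = some (if c < 0 then c + len else c).toNat := by
  simp only [PySem.List.pyIdx?]
  split_ifs <;> simp <;> omega

theorem pyGet?_resolve {α : Type} (xs : List α) (c : Int) (n : Nat)
    (h : PySem.List.pyIdx? xs.length c = some n) : PySem.List.pyGet? xs c = xs[n]? := by
  simp [PySem.List.pyGet?, h]

theorem pySetD_resolve {α : Type} (xs : List α) (c : Int) (v : α) (n : Nat)
    (h : PySem.List.pyIdx? xs.length c = some n) :
    PySem.List.pySetD xs c v = xs.set n v := by
  simp [PySem.List.pySetD, PySem.List.pySet?, h]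

theorem scanCol_spec (c : Int) (n : Nat) (rows : List (List Int))
    (H : ∀ row ∈ rows, ResolvesTo c n row) :
    (scanCol c rows).1 = (colCells n rows).head? ∧
    colCells n (rows.drop (scanCol c rows).2) = (colCells n rows).tail := by
  induction rows with
  | nil => simp [scanCol, colCells]
  | cons row rest ih =>
    obtain ⟨hiff, hget⟩ := H row (List.mem_cons_self)
    have IH := ih (fun r hr => H r (List.mem_cons_of_mem _ hr))
    simp only [scanCol]
    split
    · rename_i hg
      obtain ⟨hlt, hne⟩ := hg
      have hn : n < row.length := hiff.mp hlt
      have hsome : row[n]? = some row[n] := List.getElem?_eq_getElem hn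
      rw [hget, hsome] at hne ⊢
      simp only [Option.getD_some] at hne ⊢
      rw [colCells_cons, hsome]
      simp [optCell, hne]
    · rename_i hg
      have hcell : optCell row[n]? = [] := by
        by_cases hn : n < row.length
        · have hsome : row[n]? = some row[n] := List.getElem?_eq_getElem hn
          have hv : row[n] = 0 := by
            by_contra hv
            exact hg ⟨hiff.mpr hn, by rw [hget, hsome]; simpa using hv⟩
          simp [optCell, hsome, hv]
        · have : row[n]? = none := List.getElem?_eq_none (by omega)
          simp [optCell, this]
      rw [colCells_cons, hcell]
      simpa using IH

-- loop invariant tying A's state (answer, box, pop_list) to B's (answer, ptr, stack)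
def StInv (board : List (List Int)) (width : Nat)
    (stA : Int × List (List Int) × List Int) (stB : Int × List Int × List Int) : Prop :=
  stA.1 = stB.1 ∧ stA.2.2 = stB.2.2 ∧ stA.2.1.length = width ∧ stB.2.1.length = width ∧
  ∀ m : Nat, m < width → ∃ p : Nat, stB.2.1[m]? = some ((p : Nat) : Int) ∧
    stA.2.1[m]? = some (colCells m (board.drop p))

theorem step_inv (board : List (List Int)) (width : Nat)
    (stA : Int × List (List Int) × List Int) (stB : Int × List Int × List Int) (i : Int)
    (hrect : i ≤ 0 → ∀ row ∈ board, row.length = width)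
    (hi1 : 1 - (width : Int) ≤ i) (hi2 : i ≤ (width : Int))
    (hInv : StInv board width stA stB) :
    StInv board width (aStep stA i) (bStep board stB i) := by
  obtain ⟨hans, hstk, hlenA, hlenB, hcols⟩ := hInv
  have hwpos : 0 < width := by omega
  have hnw : ((if i - 1 < 0 then i - 1 + (width : Int) else i - 1).toNat) < width := by
    split <;> omega
  set n : Nat := (if i - 1 < 0 then i - 1 + (width : Int) else i - 1).toNat with hn
  have hidxA : PySem.List.pyIdx? stA.2.1.length (i - 1) = some n := by
    rw [hlenA, pyIdx?_resolve width (i - 1) (by omega) (by omega)]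
  have hidxB : PySem.List.pyIdx? stB.2.1.length (i - 1) = some n := by
    rw [hlenB, pyIdx?_resolve width (i - 1) (by omega) (by omega)]
  have hres : ∀ row ∈ board, ResolvesTo (i - 1) n row := by
    intro row hr
    by_cases hcneg : i - 1 < 0
    · have hrl : row.length = width := hrect (by omega) row hr
      refine ⟨⟨fun _ => by simp only [hn, if_pos hcneg]; omega, fun _ => by omega⟩, ?_⟩
      refine pyGet?_resolve row (i - 1) n ?_
      rw [hrl, pyIdx?_resolve width (i - 1) (by omega) (by omega), ← hn]
    · have hnn : n = (i - 1).toNat := by simp [hn, hcneg]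
      refine ⟨by rw [hnn]; omega, ?_⟩
      rw [hnn]
      exact PySem.List.pyGet?_of_nonneg row (by omega)
  obtain ⟨p, hptr, hbox⟩ := hcols n hnw
  have hresD : ∀ row ∈ board.drop p, ResolvesTo (i - 1) n row :=
    fun r hr => hres r (List.mem_of_mem_drop hr)
  obtain ⟨hscan1, hscan2⟩ := scanCol_spec (i - 1) n (board.drop p) hresD
  have hsetA : ∀ t, PySem.List.pySetD stA.2.1 (i - 1) t = stA.2.1.set n t :=
    fun t => pySetD_resolve _ _ _ _ hidxA
  have hsetB : ∀ v, PySem.List.pySetD stB.2.1 (i - 1) v = stB.2.1.set n v :=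
    fun v => pySetD_resolve _ _ _ _ hidxB
  have hgetA : PySem.List.pyGet? stA.2.1 (i - 1) = some (colCells n (board.drop p)) := by
    rw [pyGet?_resolve stA.2.1 (i - 1) n hidxA, hbox]
  have hgetB : PySem.List.pyGet? stB.2.1 (i - 1) = some ((p : Nat) : Int) := by
    rw [pyGet?_resolve stB.2.1 (i - 1) n hidxB, hptr]
  -- the invariant on (box', ptr') after the column update, shared by all stack cases
  have hcols' : ∀ t adv, colCells n ((board.drop p).drop adv) = t →
      ∀ m : Nat, m < width →
      ∃ q : Nat, (stB.2.1.set n ((p : Int) + (adv : Int)))[m]? = some ((q : Nat) : Int) ∧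
        (stA.2.1.set n t)[m]? = some (colCells m (board.drop q)) := by
    intro t adv ht m hm
    by_cases hmn : m = n
    · subst hmn
      refine ⟨p + adv, ?_, ?_⟩
      · rw [List.getElem?_set_self (by omega)]
        push_cast
        rfl
      · rw [List.getElem?_set_self (by omega)]
        rw [← ht, List.drop_drop]
    · obtain ⟨q, hq1, hq2⟩ := hcols m hm
      exact ⟨q, by rw [List.getElem?_set_ne (by omega : n ≠ m), hq1],
                by rw [List.getElem?_set_ne (by omega : n ≠ m), hq2]⟩
  simp only [aStep, bStep, hgetA, hgetB, Int.toNat_natCast]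
  cases hcc : colCells n (board.drop p) with
  | nil =>
    rw [hcc] at hscan1 hscan2
    simp only [hscan1, List.head?_nil, hsetB]
    refine ⟨hans, hstk, hlenA, by simp [hlenB], ?_⟩
    intro m hm
    by_cases hmn : m = n
    · subst hmn
      refine ⟨p + (scanCol (i - 1) (board.drop p)).2, ?_, ?_⟩
      · rw [List.getElem?_set_self (by omega)]
        push_cast
        rfl
      · rw [hbox, hcc, ← List.drop_drop, hscan2]
        rfl
    · obtain ⟨q, hq1, hq2⟩ := hcols m hm
      exact ⟨q, by rw [List.getElem?_set_ne (by omega : n ≠ m), hq1], hq2⟩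
  | cons v t =>
    rw [hcc] at hscan1 hscan2
    simp only [List.head?_cons] at hscan1
    simp only [hscan1, hsetA, hsetB, hstk]
    have hC := hcols' t (scanCol (i - 1) (board.drop p)).2 (by rw [hscan2]; rfl)
    cases hl : stB.2.2.getLast? with
    | none =>
      rw [if_neg (by simp)]
      exact ⟨hans, rfl, by simp [hlenA], by simp [hlenB], hC⟩
    | some tv =>
      simp only []
      by_cases htv : tv = v
      · subst htv
        rw [if_pos rfl, if_pos rfl]
        exact ⟨by rw [hans], rfl, by simp [hlenA], by simp [hlenB], hC⟩
      · rw [if_neg htv, if_neg (by simpa using htv)]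
        exact ⟨hans, rfl, by simp [hlenA], by simp [hlenB], hC⟩

theorem fold_inv (board : List (List Int)) (width : Nat) (moves : List Int) :
    ∀ (stA : Int × List (List Int) × List Int) (stB : Int × List Int × List Int),
    (∀ i ∈ moves, (1 - (width : Int) ≤ i ∧ i ≤ (width : Int)) ∧
      (i ≤ 0 → ∀ row ∈ board, row.length = width)) →
    StInv board width stA stB →
    StInv board width (moves.foldl aStep stA) (moves.foldl (bStep board) stB) := by
  induction moves with
  | nil => intro stA stB _ h; exact h
  | cons i rest ih =>
    intro stA stB hm h
    simp only [List.foldl_cons]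
    exact ih _ _ (fun j hj => hm j (List.mem_cons_of_mem _ hj))
      (step_inv board width stA stB i (fun h0 => (hm i List.mem_cons_self).2 h0)
        (hm i List.mem_cons_self).1.1 (hm i List.mem_cons_self).1.2 h)

-- ===== VERDICT =====
theorem solution_spec : Claim_equal_solution := by
  unfold Claim_equal_solution Spec_solution
  intro board moves _ hpre
  obtain ⟨hne, hrows, hmv, hrect⟩ := hpre
  cases board with
  | nil => exact absurd rfl hne
  | cons row0 rest =>
    simp only [List.headD_cons] at hrows hmv hrect
    simp only [solution, solution_alt, PySem.List.pyGet?_zero_cons]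
    have hinv : StInv (row0 :: rest) row0.length
        (0, (row0 :: rest).foldl fillRow (List.replicate row0.length []), [])
        (0, List.replicate row0.length (0 : Int), []) := by
      refine ⟨rfl, rfl, ?_, by simp, ?_⟩
      · rw [foldl_fill_len]; simp
      · intro m hm
        refine ⟨0, ?_, ?_⟩
        · simp [hm]
        · rw [foldl_fill (row0 :: rest) (List.replicate row0.length []) m]
          simp [hm]
    exact (fold_inv (row0 :: rest) row0.length moves _ _
      (fun i hi => ⟨hmv i hi, fun h0 => hrect ⟨i, hi, h0⟩⟩) hinv).1
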